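-- pv_equiv track=rewrite | github.com/Ternence123/Claw | workbuddy-global/plugins/marketplaces/codebuddy-plugins-official/plugins/security-scan/scripts/ts_parser.py | _line_to_offset
-- ===== SOURCE A (Python) =====
-- def _line_to_offset(source, line_1based):
--     """行号（1-based）转该行起始偏移量"""
--     line_num = 0
--     for i, c in enumerate(source):
--         if line_num == line_1based - 1:
--             return i
--         if c == '\n':
--             line_num += 1
--     return len(source)
-- ===== SOURCE B (Python) =====
-- def _line_to_offset(source, line_1based):
--     """行号（1-based）转该行起始偏移量"""
--     parts = source.split('\n')
--     if line_1based < 1 or line_1based > len(parts):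
--         return len(source)
--     return sum(len(p) + 1 for p in parts[:line_1based - 1])
-- ===== Notes on version B (the rewrite author's own statement) =====
-- stated objective: faster
-- what changed: Replaces the per-character enumerate scan that counts newlines with a single split('\n') into line segments followed by a bounds check and a sum of segment lengths over the prefix.
import Mathlib
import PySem

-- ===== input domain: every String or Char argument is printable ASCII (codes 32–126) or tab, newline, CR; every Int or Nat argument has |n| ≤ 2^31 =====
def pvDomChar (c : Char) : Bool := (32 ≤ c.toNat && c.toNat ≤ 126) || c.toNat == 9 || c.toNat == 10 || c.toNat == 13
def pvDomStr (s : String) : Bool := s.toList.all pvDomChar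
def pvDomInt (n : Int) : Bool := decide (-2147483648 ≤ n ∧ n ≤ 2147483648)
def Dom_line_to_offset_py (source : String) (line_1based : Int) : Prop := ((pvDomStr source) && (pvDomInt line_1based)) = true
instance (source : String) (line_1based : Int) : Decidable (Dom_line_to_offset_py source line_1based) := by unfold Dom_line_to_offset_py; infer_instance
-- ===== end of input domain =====

-- B replaces A's per-character newline-counting scan by split('\n') into segments plus a prefix sum (measured faster in Python).

-- ===== PORT A =====
-- the 'for i, c in enumerate(source)' loop with state line_num; 'some i' = the early 'return i'
def lineToOffsetGo (pairs : List (Int × Char)) (lineNum : Int) (target : Int) : Option Int :=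
  match pairs with
  | [] => none
  | (i, c) :: rest =>
    if lineNum = target then some i
    else lineToOffsetGo rest (if c = '\n' then lineNum + 1 else lineNum) target

def line_to_offset_py (source : String) (line_1based : Int) : Int :=
  (lineToOffsetGo (PySem.List.enumerate source.toList 0) 0 (line_1based - 1)).getD
    (PySem.Str.len source : Int)

-- ===== PORT B =====
def line_to_offset_py_alt (source : String) (line_1based : Int) : Int :=
  let parts := (PySem.Str.split? source "\n").getD []
  if line_1based < 1 ∨ line_1based > (parts.length : Int) then (PySem.Str.len source : Int)
  else ((PySem.List.slice parts none (some (line_1based - 1))).map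
          (fun p => (PySem.Str.len p : Int) + 1)).sum

-- ===== PRECONDITION & SPEC =====
def Spec_line_to_offset_py (source : String) (line_1based : Int) (out : Int) : Prop := out = line_to_offset_py_alt source line_1based
instance (source : String) (line_1based : Int) (out : Int) : Decidable (Spec_line_to_offset_py source line_1based out) := by unfold Spec_line_to_offset_py; infer_instance

-- ===== CLAIM (what is proved, stated in full; the proofs are below) =====
def Claim_equal_line_to_offset_py : Prop := ∀ (source : String) (line_1based : Int), Dom_line_to_offset_py source line_1based → Spec_line_to_offset_py source line_1based (line_to_offset_py source line_1based)

-- ===== LEMMAS AND PROOFS =====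

-- a structural characterisation of Python's split('\n') on char lists
def splitNl : List Char → List (List Char)
  | [] => [[]]
  | c :: rest =>
    if c = '\n' then [] :: splitNl rest
    else
      match splitNl rest with
      | [] => [[c]]
      | p :: ps => (c :: p) :: ps

theorem splitNl_ne_nil (cs : List Char) : splitNl cs ≠ [] := by
  cases cs with
  | nil => simp [splitNl]
  | cons c rest =>
    simp only [splitNl]
    split_ifs
    · simp
    · cases h : splitNl rest <;> simp

theorem splitOn_go_spec (cs : List Char) : ∀ (fuel : Nat) (cur : List Char) (acc : List (List Char)),
    cs.length < fuel →
    PySem.Chars.splitOn.go ['\n'] fuel cs cur acc =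
      acc.reverse ++ ((cur.reverse ++ (splitNl cs).headI) :: (splitNl cs).tail) := by
  induction cs with
  | nil =>
    intro fuel cur acc h
    match fuel with
    | f + 1 => simp [PySem.Chars.splitOn.go, splitNl]
  | cons c rest ih =>
    intro fuel cur acc h
    match fuel with
    | f + 1 =>
      have hf : rest.length < f := by simpa using h
      by_cases hc : c = '\n'
      · subst hc
        have hpre : List.isPrefixOf ['\n'] ('\n' :: rest) = true := by
          simp [List.isPrefixOf]
        rw [PySem.Chars.splitOn.go]
        simp only [hpre, if_pos]
        rw [show List.drop (['\n'].length) ('\n' :: rest) = rest by simp]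
        rw [ih f [] (cur.reverse :: acc) hf]
        have := splitNl_ne_nil rest
        cases hs : splitNl rest with
        | nil => exact absurd hs this
        | cons p ps => simp [splitNl, hs]
      · have hpre : List.isPrefixOf ['\n'] (c :: rest) = false := by
          simp [List.isPrefixOf]
          exact fun hh => hc hh.symm
        rw [PySem.Chars.splitOn.go]
        simp only [hpre]
        rw [if_neg (by simp)]
        rw [ih f (c :: cur) acc hf]
        have := splitNl_ne_nil rest
        cases hs : splitNl rest with
        | nil => exact absurd hs this
        | cons p ps => simp [splitNl, hs, hc]

theorem splitOn_eq_splitNl (cs : List Char) :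
    PySem.Chars.splitOn cs ['\n'] = splitNl cs := by
  unfold PySem.Chars.splitOn
  rw [splitOn_go_spec cs (cs.length + 1) [] [] (by omega)]
  have := splitNl_ne_nil cs
  cases hs : splitNl cs with
  | nil => exact absurd hs this
  | cons p ps => simp

-- A's loop never fires when the target is already below the current line counter
theorem lineToOffsetGo_neg (pairs : List (Int × Char)) : ∀ (n t : Int), t < n →
    lineToOffsetGo pairs n t = none := by
  induction pairs with
  | nil => intro n t h; simp [lineToOffsetGo]
  | cons p rest ih =>
    intro n t h
    obtain ⟨i, c⟩ := p
    simp only [lineToOffsetGo]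
    rw [if_neg (by omega)]
    split_ifs with hc <;> [exact ih (n+1) t (by omega); exact ih n t h]

-- the loop counter and the target can be shifted together
theorem lineToOffsetGo_shift (pairs : List (Int × Char)) : ∀ (n t d : Int),
    lineToOffsetGo pairs (n + d) (t + d) = lineToOffsetGo pairs n t := by
  induction pairs with
  | nil => intro n t d; simp [lineToOffsetGo]
  | cons p rest ih =>
    intro n t d
    obtain ⟨i, c⟩ := p
    simp only [lineToOffsetGo]
    by_cases h : n = t
    · rw [if_pos (by omega), if_pos h]
    · rw [if_neg (by omega), if_neg h]
      split_ifs with hc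
      · have := ih (n + 1) t d
        rw [show n + d + 1 = n + 1 + d by ring, this]
      · exact ih n t d

-- the main invariant: A's scan, with default len, computes B's prefix-sum over splitNl
theorem lineToOffsetGo_key (cs : List Char) : ∀ (i : Int) (t : Nat),
    (lineToOffsetGo (PySem.List.enumerate cs i) 0 (t : Int)).getD (i + cs.length) =
      i + (if (splitNl cs).length < t + 1 then (cs.length : Int)
           else (((splitNl cs).take t).map (fun p => (p.length : Int) + 1)).sum) := by
  induction cs with
  | nil =>
    intro i t
    match t with
    | 0 => simp [PySem.List.enumerate, lineToOffsetGo, splitNl]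
    | t' + 1 => simp [PySem.List.enumerate, lineToOffsetGo, splitNl]
  | cons c rest ih =>
    intro i t
    rw [PySem.List.enumerate_cons]
    match t with
    | 0 =>
      have h1 : (splitNl (c :: rest)).length ≥ 1 := by
        have := splitNl_ne_nil (c :: rest)
        cases hs : splitNl (c :: rest) with
        | nil => exact absurd hs this
        | cons p ps => simp
      have hsome : lineToOffsetGo ((i, c) :: PySem.List.enumerate rest (i + 1)) 0 ((0 : Nat) : Int)
          = some i := by simp [lineToOffsetGo]
      rw [hsome]
      rw [if_neg (by omega)]
      simp
    | t' + 1 =>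
      simp only [lineToOffsetGo]
      rw [if_neg (by push_cast; omega)]
      by_cases hc : c = '\n'
      · rw [if_pos hc]
        have hshift : lineToOffsetGo (PySem.List.enumerate rest (i + 1)) (0 + 1) ((t' : Int) + 1)
            = lineToOffsetGo (PySem.List.enumerate rest (i + 1)) 0 (t' : Int) :=
          lineToOffsetGo_shift _ 0 (t' : Int) 1
        rw [show ((t' + 1 : Nat) : Int) = (t' : Int) + 1 by push_cast; ring]
        rw [hshift]
        have := ih (i + 1) t'
        rw [show i + ((c :: rest).length : Int) = (i + 1) + rest.length by simp; ring]
        rw [this]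
        have hs : splitNl (c :: rest) = [] :: splitNl rest := by simp [splitNl, hc]
        rw [hs]
        split_ifs with h1 h2 h2
        · simp; ring
        · simp at h1 h2; omega
        · simp at h1 h2; omega
        · simp
          ring
      · rw [if_neg hc]
        rw [show ((t' + 1 : Nat) : Int) = ((t' + 1 : Nat) : Int) from rfl]
        have := ih (i + 1) (t' + 1)
        rw [show i + ((c :: rest).length : Int) = (i + 1) + rest.length by simp; ring]
        rw [this]
        have hne := splitNl_ne_nil rest
        cases hs : splitNl rest with
        | nil => exact absurd hs hne
        | cons p ps =>
          have hs2 : splitNl (c :: rest) = (c :: p) :: ps := by simp [splitNl, hc, hs]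
          rw [hs2]
          simp only [List.length_cons]
          split_ifs with h1
          · simp; ring
          · simp
            ring

-- ===== VERDICT (by name: the statement is the Claim_ definition above) =====
theorem line_to_offset_py_spec : Claim_equal_line_to_offset_py := by
  unfold Claim_equal_line_to_offset_py Spec_line_to_offset_py
  intro source line _
  simp only [line_to_offset_py, line_to_offset_py_alt]
  have hsplit : (PySem.Str.split? source "\n").getD [] = (splitNl source.toList).map String.ofList := by
    rw [PySem.Str.split?]
    have : PySem.Chars.split? source.toList "\n".toList = some (splitNl source.toList) := by
      rw [show "\n".toList = ['\n'] from rfl]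
      rw [PySem.Chars.split?]
      simp [splitOn_eq_splitNl]
    rw [this]
    simp
  rw [hsplit]
  by_cases hl : line < 1
  · -- target negative: A's loop returns none, both sides give len source
    rw [if_pos (Or.inl hl)]
    rw [lineToOffsetGo_neg _ 0 (line - 1) (by omega)]
    simp
  · rw [not_lt] at hl
    have ht : line - 1 = ((line - 1).toNat : Int) := by omega
    rw [ht]
    have hkey := lineToOffsetGo_key source.toList 0 (line - 1).toNat
    rw [show (PySem.Str.len source : Int) = 0 + (source.toList.length : Int) by
      simp [PySem.Str.len]]
    rw [hkey]
    have hlen : ((splitNl source.toList).map String.ofList).length = (splitNl source.toList).length := by simp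
    rw [hlen]
    by_cases hc : (splitNl source.toList).length < (line - 1).toNat + 1
    · rw [if_pos hc, if_pos (Or.inr (by omega))]
    · rw [if_neg hc, if_neg (by rintro (h | h) <;> omega)]
      rw [PySem.List.slice_to_natCast, zero_add]
      simp [List.map_take, List.map_map, Function.comp_def, PySem.Str.len]
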